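-- pv_equiv track=rewrite | github.com/zahid2011/Multi-Agent-Pathfinding-Visualizer | cbs.py | no_conflicts
-- ===== SOURCE A (Python) =====
-- def no_conflicts(paths):
--     visited = {}
--     for t, positions in enumerate(zip(*paths)):
--         for i, pos in enumerate(positions):
--             if (pos, t) in visited:
--                 return False
--             visited[(pos, t)] = i
--     return True
-- ===== SOURCE B (Python) =====
-- def no_conflicts(paths):
--     if not paths:
--         return True
--     T = min(len(p) for p in paths)
--     for i, p in enumerate(paths):
--         for q in paths[i + 1:]:
--             if any(p[t] == q[t] for t in range(T)):
--                 return False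
--     return True
-- ===== Notes on version B (the rewrite author's own statement) =====
-- stated objective: alternative
-- what changed: Replaces A's timestep-major sweep (zip the paths into columns and record every (pos,t) in a global visited dict, failing on a repeat) with an agent-major pairwise comparison: compute the common horizon T = min path length once, then for each pair of agents compare their two paths position-by-position over t < T; no columns, no dict, no cross-timestep accumulator.
import Mathlib
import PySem

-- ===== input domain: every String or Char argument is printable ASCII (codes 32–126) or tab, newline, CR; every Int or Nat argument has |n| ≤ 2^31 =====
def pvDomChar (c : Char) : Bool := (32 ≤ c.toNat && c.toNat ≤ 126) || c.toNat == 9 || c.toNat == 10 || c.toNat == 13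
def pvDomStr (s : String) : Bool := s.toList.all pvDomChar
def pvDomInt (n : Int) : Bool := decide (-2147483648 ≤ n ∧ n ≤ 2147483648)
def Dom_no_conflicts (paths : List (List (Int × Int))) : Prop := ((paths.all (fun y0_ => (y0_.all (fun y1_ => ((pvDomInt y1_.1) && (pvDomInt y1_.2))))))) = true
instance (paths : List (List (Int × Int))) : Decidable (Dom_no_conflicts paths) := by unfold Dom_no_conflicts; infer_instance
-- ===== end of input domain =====

-- B replaces A's timestep-major dict sweep over zip(*paths) with an agent-major pairwise
-- comparison of whole paths over the common horizon T = min path length — an alternative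
-- algorithm of similar cost (O(k^2*T) vs O(k*T)), not claimed faster.


-- ===== PORT A =====
-- zip(*paths): pvHeads? strips the first element of every path (none when some path is
-- exhausted); pvZipAux iterates this; fuel = length of the first path bounds min length.
-- zip() with no arguments (paths = []) yields nothing. Exact transliteration of zip(*paths).
def pvHeads? : List (List (Int × Int)) → Option (List (Int × Int) × List (List (Int × Int)))
  | [] => some ([], [])
  | [] :: _ => none
  | (p :: ps) :: rest =>
    match pvHeads? rest with
    | none => none
    | some (hs, ts) => some (p :: hs, ps :: ts)

def pvZipAux : Nat → List (List (Int × Int)) → List (List (Int × Int))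
  | 0, _ => []
  | n + 1, paths =>
    match pvHeads? paths with
    | none => []
    | some (hs, ts) => hs :: pvZipAux n ts

def pvZip (paths : List (List (Int × Int))) : List (List (Int × Int)) :=
  match paths with
  | [] => []
  | p :: rest => pvZipAux p.length (p :: rest)

-- inner 'for i, pos in enumerate(positions)' loop; none = early 'return False'
def pvInnerA (t : Int) : List (Int × Int) → PySem.Dict ((Int × Int) × Int) Int → Int →
    Option (PySem.Dict ((Int × Int) × Int) Int)
  | [], visited, _ => some visited
  | pos :: rest, visited, i =>
    if visited.contains (pos, t) then none
    else pvInnerA t rest (visited.insert (pos, t) i) (i + 1)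

-- outer 'for t, positions in enumerate(zip(*paths))' loop
def pvOuterA : List (List (Int × Int)) → Int → PySem.Dict ((Int × Int) × Int) Int → Bool
  | [], _, _ => true
  | ps :: rest, t, visited =>
    match pvInnerA t ps visited 0 with
    | none => false
    | some v => pvOuterA rest (t + 1) v

def no_conflicts (paths : List (List (Int × Int))) : Bool :=
  pvOuterA (pvZip paths) 0 PySem.Dict.empty

-- ===== PORT B =====
-- T = min(len(p) for p in paths): Python's min folds min from the first generated value
def pvMinLen (p : List (Int × Int)) (rest : List (List (Int × Int))) : Int :=
  rest.foldl (fun acc q => min acc (q.length : Int)) (p.length : Int)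

-- 'for i, p in enumerate(paths): for q in paths[i+1:]: if any(p[t] == q[t] for t in range(T)): return False'
-- as recursion over suffixes of paths
def pvOuterB (T : Int) : List (List (Int × Int)) → Bool
  | [] => true
  | p :: rest =>
    if rest.any (fun q => (PySem.List.pyRange 0 T 1).any
        (fun t => PySem.List.pyGet? p t == PySem.List.pyGet? q t)) then false
    else pvOuterB T rest

def no_conflicts_alt (paths : List (List (Int × Int))) : Bool :=
  match paths with
  | [] => true
  | p :: rest => pvOuterB (pvMinLen p rest) (p :: rest)

-- ===== PRECONDITION & SPEC =====
def Spec_no_conflicts (paths : List (List (Int × Int))) (out : Bool) : Prop := out = no_conflicts_alt paths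
instance (paths : List (List (Int × Int))) (out : Bool) : Decidable (Spec_no_conflicts paths out) := by unfold Spec_no_conflicts; infer_instance

-- ===== CLAIM (what is proved, stated in full; the proofs are below) =====
def Claim_equal_no_conflicts : Prop := ∀ (paths : List (List (Int × Int))), Dom_no_conflicts paths → Spec_no_conflicts paths (no_conflicts paths)

-- ===== LEMMAS AND PROOFS =====

-- column t of the (nonragged part of the) path matrix
def pvColD (paths : List (List (Int × Int))) (t : Nat) : List (Int × Int) :=
  paths.map (fun p => p.getD t (0, 0))

theorem pvFoldrMin_le_init (l : List Nat) (a : Nat) : l.foldr min a ≤ a := by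
  induction l with
  | nil => simp
  | cons x xs ih => simp only [List.foldr_cons]; omega

theorem pvFoldrMin_le_mem (l : List Nat) (a : Nat) {x : Nat} (hx : x ∈ l) : l.foldr min a ≤ x := by
  induction l with
  | nil => cases hx
  | cons y ys ih =>
    rcases List.mem_cons.1 hx with h | h
    · subst h; simp only [List.foldr_cons]; omega
    · have := ih h; simp only [List.foldr_cons]; omega

theorem pvFoldrMin_eq_zero_of_mem (l : List Nat) (a : Nat) (h : 0 ∈ l) : l.foldr min a = 0 := by
  have := pvFoldrMin_le_mem l a h; omega

theorem pvFoldrMin_pred (l : List Nat) (n : Nat) (h : ∀ x ∈ l, 1 ≤ x) :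
    (l.map (· - 1)).foldr min n = l.foldr min (n + 1) - 1 := by
  induction l with
  | nil => simp
  | cons x xs ih =>
    have hx := h x (by simp)
    have ihx := ih (fun y hy => h y (by simp [hy]))
    simp only [List.map_cons, List.foldr_cons]
    have hle := pvFoldrMin_le_init xs (n + 1)
    omega

theorem pvFoldrMin_pos (l : List Nat) (a : Nat) (ha : 1 ≤ a) (h : ∀ x ∈ l, 1 ≤ x) :
    1 ≤ l.foldr min a := by
  induction l with
  | nil => simpa
  | cons x xs ih =>
    have hx := h x (by simp)
    have := ih (fun y hy => h y (by simp [hy]))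
    simp only [List.foldr_cons]; omega

theorem pvFoldrMin_min_comm (l : List Nat) (a b : Nat) :
    l.foldr min (min a b) = min b (l.foldr min a) := by
  induction l with
  | nil => simp [Nat.min_comm]
  | cons x xs ih => simp only [List.foldr_cons, ih]; omega

theorem pvHeads?_eq_none_iff (paths : List (List (Int × Int))) :
    pvHeads? paths = none ↔ [] ∈ paths := by
  induction paths with
  | nil => simp [pvHeads?]
  | cons p rest ih =>
    cases p with
    | nil => simp [pvHeads?]
    | cons x xs =>
      simp only [pvHeads?, List.mem_cons]
      cases h : pvHeads? rest with
      | none => simp [ih.1 h]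
      | some pr =>
        have hni : ¬ [] ∈ rest := fun hc => by rw [ih.2 hc] at h; cases h
        simp [hni]

theorem pvHeads?_eq_some (paths : List (List (Int × Int))) (h : ¬ [] ∈ paths) :
    pvHeads? paths = some (pvColD paths 0, paths.map List.tail) := by
  induction paths with
  | nil => simp [pvHeads?, pvColD]
  | cons p rest ih =>
    cases p with
    | nil => exact absurd (by simp) h
    | cons x xs =>
      have hrest : ¬ [] ∈ rest := fun hc => h (by simp [hc])
      simp [pvHeads?, ih hrest, pvColD]

theorem pvColD_tail (paths : List (List (Int × Int))) (h : ¬ [] ∈ paths) (t : Nat) :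
    pvColD (paths.map List.tail) t = pvColD paths (t + 1) := by
  unfold pvColD
  rw [List.map_map]
  apply List.map_congr_left
  intro p hp
  cases p with
  | nil => exact absurd hp h
  | cons y ys => simp

theorem pvZipAux_eq (fuel : Nat) : ∀ paths : List (List (Int × Int)),
    pvZipAux fuel paths = (List.range ((paths.map List.length).foldr min fuel)).map (pvColD paths) := by
  induction fuel with
  | zero =>
    intro paths
    have h0 : (paths.map List.length).foldr min 0 = 0 := by
      have := pvFoldrMin_le_init (paths.map List.length) 0; omega
    simp [pvZipAux, h0]
  | succ n ih =>
    intro paths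
    by_cases hmem : [] ∈ paths
    · have hz : (paths.map List.length).foldr min (n + 1) = 0 :=
        pvFoldrMin_eq_zero_of_mem _ _ (by
          exact List.mem_map.2 ⟨[], hmem, rfl⟩)
      simp [pvZipAux, (pvHeads?_eq_none_iff paths).2 hmem, hz]
    · have hpos : ∀ x ∈ paths.map List.length, 1 ≤ x := by
        intro x hx
        rcases List.mem_map.1 hx with ⟨p, hp, rfl⟩
        cases p with
        | nil => exact absurd hp hmem
        | cons _ _ => simp
      have hlen : (paths.map List.tail).map List.length = (paths.map List.length).map (· - 1) := by
        rw [List.map_map, List.map_map]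
        apply List.map_congr_left
        intro p _; cases p <;> simp
      have hM1 : 1 ≤ (paths.map List.length).foldr min (n + 1) :=
        pvFoldrMin_pos _ _ (by omega) hpos
      have hstep : pvZipAux (n + 1) paths =
          pvColD paths 0 :: pvZipAux n (paths.map List.tail) := by
        rw [pvZipAux, pvHeads?_eq_some paths hmem]
      rw [hstep, ih]
      have hMeq : (paths.map List.length).foldr min (n + 1) =
          ((paths.map List.tail).map List.length).foldr min n + 1 := by
        rw [hlen, pvFoldrMin_pred _ _ hpos]; omega
      rw [hMeq, List.range_succ_eq_map, List.map_cons, List.map_map]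
      congr 1
      rw [List.map_map]
      apply List.map_congr_left
      intro a _
      exact pvColD_tail paths hmem a

theorem pvMinLen_foldl (rest : List (List (Int × Int))) : ∀ a : Nat,
    rest.foldl (fun acc q => min acc (q.length : Int)) (a : Int) =
      (((rest.map List.length).foldr min a : Nat) : Int) := by
  induction rest with
  | nil => intro a; simp
  | cons q qs ih =>
    intro a
    rw [List.foldl_cons, show (min (a : Int) (q.length : Int)) = ((min a q.length : Nat) : Int) by
      simp [Nat.cast_min], ih (min a q.length)]
    simp only [List.map_cons, List.foldr_cons]
    rw [pvFoldrMin_min_comm]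

theorem pvMinLen_eq (p : List (Int × Int)) (rest : List (List (Int × Int))) :
    pvMinLen p rest = (((rest.map List.length).foldr min p.length : Nat) : Int) := by
  unfold pvMinLen; exact pvMinLen_foldl rest p.length

theorem pvInnerA_none_iff (t : Int) (ps : List (Int × Int)) :
    ∀ (visited : PySem.Dict ((Int × Int) × Int) Int) (i : Int),
      (pvInnerA t ps visited i = none ↔
        ¬ (ps.Nodup ∧ ∀ p ∈ ps, visited.contains (p, t) = false)) := by
  induction ps with
  | nil => intro visited i; simp [pvInnerA]
  | cons pos rest ih =>
    intro visited i
    by_cases hc : visited.contains (pos, t) = true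
    · simp only [pvInnerA, hc, if_true]
      have hnb : ¬ ((pos :: rest).Nodup ∧ ∀ p ∈ pos :: rest, visited.contains (p, t) = false) := by
        rintro ⟨-, hall⟩
        have := hall pos (by simp)
        rw [this] at hc
        exact Bool.false_ne_true hc
      exact iff_of_true trivial hnb
    · have hcf : visited.contains (pos, t) = false := by
        cases h : visited.contains (pos, t) with
        | false => rfl
        | true => exact absurd h hc
      simp only [pvInnerA, hcf, Bool.false_eq_true, if_false]
      rw [ih]
      have hins : ∀ p : Int × Int,
          ((visited.insert (pos, t) i).contains (p, t) = false) ↔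
            (p ≠ pos ∧ visited.contains (p, t) = false) := by
        intro p
        rw [PySem.Dict.contains_insert]
        constructor
        · intro h
          rcases Bool.or_eq_false_iff.1 h with ⟨h1, h2⟩
          refine ⟨?_, h2⟩
          intro hpe; subst hpe; simp at h1
        · intro ⟨h1, h2⟩
          apply Bool.or_eq_false_iff.2
          refine ⟨?_, h2⟩
          simp [h1]
      constructor
      · intro h hbad
        apply h
        rcases hbad with ⟨hnd, hall⟩
        refine ⟨(List.nodup_cons.1 hnd).2, ?_⟩
        intro p hp
        rw [hins p]
        exact ⟨fun hpe => (List.nodup_cons.1 hnd).1 (hpe ▸ hp), hall p (List.mem_cons_of_mem _ hp)⟩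
      · intro h hbad
        apply h
        rcases hbad with ⟨hnd, hall⟩
        refine ⟨List.nodup_cons.2 ⟨?_, ?_⟩, ?_⟩
        · intro hmem
          exact ((hins pos).1 (hall pos hmem)).1 rfl
        · exact hnd
        · intro p hp
          rcases List.mem_cons.1 hp with hpe | hpr
          · rw [hpe]; exact hcf
          · exact ((hins p).1 (hall p hpr)).2

theorem pvInnerA_contains (t : Int) (ps : List (Int × Int)) :
    ∀ (visited : PySem.Dict ((Int × Int) × Int) Int) (i : Int) v,
      pvInnerA t ps visited i = some v →
      ∀ k, v.contains k = true → visited.contains k = true ∨ k.2 = t := by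
  induction ps with
  | nil =>
    intro visited i v h k hk
    simp only [pvInnerA, Option.some.injEq] at h
    exact Or.inl (h ▸ hk)
  | cons pos rest ih =>
    intro visited i v h k hk
    by_cases hc : visited.contains (pos, t) = true
    · simp [pvInnerA, hc] at h
    · have hcf : visited.contains (pos, t) = false := by
        cases hx : visited.contains (pos, t) with
        | false => rfl
        | true => exact absurd hx hc
      simp only [pvInnerA, hcf, Bool.false_eq_true, if_false] at h
      rcases ih _ _ _ h k hk with hin | ht
      · rw [PySem.Dict.contains_insert] at hin
        rcases Bool.or_eq_true_iff.1 hin with he | hold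
        · right
          have : k = (pos, t) := by simpa using he
          rw [this]
        · exact Or.inl hold
      · exact Or.inr ht

theorem pvOuterA_eq (tss : List (List (Int × Int))) :
    ∀ (t : Int) (visited : PySem.Dict ((Int × Int) × Int) Int),
      (∀ (p : Int × Int) (t' : Int), t ≤ t' → visited.contains (p, t') = false) →
      pvOuterA tss t visited = tss.all (fun ps => decide ps.Nodup) := by
  induction tss with
  | nil => intro t visited _; simp [pvOuterA]
  | cons ps rest ih =>
    intro t visited hinv
    have hfresh : ∀ p ∈ ps, visited.contains (p, t) = false :=
      fun p _ => hinv p t le_rfl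
    cases hin : pvInnerA t ps visited 0 with
    | none =>
      have := (pvInnerA_none_iff t ps visited 0).1 hin
      have hnd : ¬ ps.Nodup := fun h => this ⟨h, hfresh⟩
      simp [pvOuterA, hin, List.all_cons, hnd]
    | some v =>
      have hnotnone : pvInnerA t ps visited 0 ≠ none := by simp [hin]
      have hok : ps.Nodup ∧ ∀ p ∈ ps, visited.contains (p, t) = false := by
        by_contra hbad
        exact hnotnone ((pvInnerA_none_iff t ps visited 0).2 hbad)
      have hinv' : ∀ (p : Int × Int) (t' : Int), t + 1 ≤ t' → v.contains (p, t') = false := by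
        intro p t' ht'
        cases hx : v.contains (p, t') with
        | false => rfl
        | true =>
          rcases pvInnerA_contains t ps visited 0 v hin (p, t') hx with hold | heq
          · have := hinv p t' (by omega)
            simp [this] at hold
          · simp at heq; omega
      simp only [pvOuterA, hin, List.all_cons]
      rw [ih (t + 1) v hinv']
      simp [hok.1]

-- B's suffix recursion is exactly List.Pairwise over paths
theorem pvOuterB_pairwise (T : Int) (l : List (List (Int × Int))) :
    pvOuterB T l = true ↔
      l.Pairwise (fun p q => ∀ t : Int, t ∈ PySem.List.pyRange 0 T 1 →
        ¬ PySem.List.pyGet? p t = PySem.List.pyGet? q t) := by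
  induction l with
  | nil => simp [pvOuterB]
  | cons p rest ih =>
    simp only [pvOuterB, List.pairwise_cons]
    by_cases hany : rest.any (fun q => (PySem.List.pyRange 0 T 1).any
        (fun t => PySem.List.pyGet? p t == PySem.List.pyGet? q t)) = true
    · simp only [hany, if_true]
      rcases List.any_eq_true.1 hany with ⟨q, hq, hconf⟩
      rcases List.any_eq_true.1 hconf with ⟨t, ht, heq⟩
      constructor
      · intro h; exact absurd h Bool.false_ne_true
      · rintro ⟨hall, -⟩
        exact absurd (beq_iff_eq.1 heq) (hall q hq t ht)
    · simp only [hany]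
      have hnone : ∀ q ∈ rest, ∀ t ∈ PySem.List.pyRange 0 T 1,
          ¬ PySem.List.pyGet? p t = PySem.List.pyGet? q t := by
        intro q hq t ht heq
        exact hany (List.any_eq_true.2 ⟨q, hq, List.any_eq_true.2 ⟨t, ht, beq_iff_eq.2 heq⟩⟩)
      tauto

-- the key bridge: all columns t < M duplicate-free ↔ pairwise agent comparison up to M
theorem pvColumns_iff_pairwise (paths : List (List (Int × Int))) (M : Nat)
    (hM : ∀ q ∈ paths, M ≤ q.length) :
    (∀ t < M, (pvColD paths t).Nodup) ↔
      paths.Pairwise (fun p q => ∀ t : Int, t ∈ PySem.List.pyRange 0 (M : Int) 1 →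
        ¬ PySem.List.pyGet? p t = PySem.List.pyGet? q t) := by
  have hget : ∀ q ∈ paths, ∀ n : Nat, n < M →
      PySem.List.pyGet? q (n : Int) = some (q.getD n (0, 0)) := by
    intro q hq n hn
    have hlen : n < q.length := lt_of_lt_of_le hn (hM q hq)
    rw [PySem.List.pyGet?_natCast]
    simp [List.getD, List.getElem?_eq_getElem hlen]
  have hinner : ∀ p ∈ paths, ∀ q ∈ paths,
      ((∀ t : Int, t ∈ PySem.List.pyRange 0 (M : Int) 1 →
          ¬ PySem.List.pyGet? p t = PySem.List.pyGet? q t) ↔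
        (∀ n : Nat, n < M → p.getD n (0, 0) ≠ q.getD n (0, 0))) := by
    intro p hp q hq
    constructor
    · intro h n hn heq
      apply h (n : Int) (by rw [PySem.List.mem_pyRange_one]; constructor <;> omega)
      rw [hget p hp n hn, hget q hq n hn, heq]
    · intro h t ht heq
      rw [PySem.List.mem_pyRange_one] at ht
      have hn : t.toNat < M := by omega
      have htn : ((t.toNat : Nat) : Int) = t := by omega
      rw [← htn, hget p hp _ hn, hget q hq _ hn] at heq
      exact h t.toNat hn (Option.some.injEq _ _ ▸ heq)
  constructor
  · intro h
    rw [List.pairwise_iff_getElem]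
    intro i j hi hj hij
    rw [hinner _ (paths.getElem_mem hi) _ (paths.getElem_mem hj)]
    intro n hn heq
    have hcol := h n hn
    unfold pvColD at hcol
    have hieq : (paths.map (fun p => p.getD n (0, 0)))[i]'(by simpa using hi) =
        (paths.map (fun p => p.getD n (0, 0)))[j]'(by simpa using hj) := by
      simp only [List.getElem_map]; exact heq
    have := (List.Nodup.getElem_inj_iff hcol).1 hieq
    omega
  · intro h t ht
    unfold pvColD
    rw [List.nodup_iff_injective_getElem]
    intro i j heq
    by_contra hne
    have hij : (i : Nat) ≠ (j : Nat) := fun hc => hne (Fin.ext hc)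
    simp only [List.getElem_map] at heq
    rw [List.pairwise_iff_getElem] at h
    have hi := i.isLt; have hj := j.isLt
    simp only [List.length_map] at hi hj
    rcases Nat.lt_or_ge (i : Nat) (j : Nat) with hlt | hge
    · have := (hinner _ (paths.getElem_mem hi) _ (paths.getElem_mem hj)).1
        (h (i : Nat) (j : Nat) hi hj hlt) t ht
      exact this heq
    · have hlt : (j : Nat) < (i : Nat) := by omega
      have := (hinner _ (paths.getElem_mem hj) _ (paths.getElem_mem hi)).1
        (h (j : Nat) (i : Nat) hj hi hlt) t ht
      exact this heq.symm

-- ===== VERDICT (by name: the statement is the Claim_ definition above) =====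
theorem no_conflicts_spec : Claim_equal_no_conflicts := by
  intro paths _
  unfold Spec_no_conflicts
  cases paths with
  | nil => rfl
  | cons p rest =>
    have hA : no_conflicts (p :: rest) =
        (pvZip (p :: rest)).all (fun ps => decide ps.Nodup) :=
      pvOuterA_eq (pvZip (p :: rest)) 0 PySem.Dict.empty
        (fun q t' _ => PySem.Dict.contains_empty _)
    set M : Nat := (rest.map List.length).foldr min p.length with hMdef
    have hMfuel : ((p :: rest).map List.length).foldr min p.length = M := by
      simp only [List.map_cons, List.foldr_cons, hMdef]
      have := pvFoldrMin_le_init (rest.map List.length) p.length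
      omega
    have hzip : pvZip (p :: rest) = (List.range M).map (pvColD (p :: rest)) := by
      show pvZipAux p.length (p :: rest) = _
      rw [pvZipAux_eq, hMfuel]
    have hM : ∀ q ∈ (p :: rest), M ≤ q.length := by
      intro q hq
      rcases List.mem_cons.1 hq with h | h
      · subst h; exact pvFoldrMin_le_init _ _
      · exact pvFoldrMin_le_mem _ _ (List.mem_map.2 ⟨q, h, rfl⟩)
    have hB : no_conflicts_alt (p :: rest) = pvOuterB (M : Int) (p :: rest) := by
      show pvOuterB (pvMinLen p rest) (p :: rest) = _
      rw [pvMinLen_eq, ← hMdef]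
    rw [hA, hB, hzip]
    rcases Bool.eq_false_or_eq_true (pvOuterB (M : Int) (p :: rest)) with hb | hb
    all_goals rw [hb]
    · rw [List.all_eq_true]
      have := (pvOuterB_pairwise (M : Int) (p :: rest)).1 hb
      rw [← pvColumns_iff_pairwise _ _ hM] at this
      intro ps hps
      rcases List.mem_map.1 hps with ⟨t, htr, rfl⟩
      simpa using this t (List.mem_range.1 htr)
    · rw [List.all_eq_false]
      have := (not_iff_not.2 (pvOuterB_pairwise (M : Int) (p :: rest))).1 (by simp [hb])
      rw [← pvColumns_iff_pairwise _ _ hM] at this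
      push Not at this
      rcases this with ⟨t, ht, hnd⟩
      exact ⟨pvColD (p :: rest) t, List.mem_map.2 ⟨t, List.mem_range.2 ht, rfl⟩, by simp [hnd]⟩
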